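-- pv_equiv track=rewrite | github.com/nicky0830/programmers | 프로그래머스/1/155652. 둘만의 암호/둘만의 암호.py | solution
-- ===== SOURCE A (Python) =====
-- def solution(s, skip, index):
--     answer = ''
--     for a in s:
--         count = 0
--         for i in range(ord(a)+1, ord(a)+index+1):
--             check = ''
--             if i>ord('z'):
--                 check = chr(i-ord('z')+ord('a')-1)
--             else:
--                 check = chr(i)
--             if check in skip:
--                 count += 1
--         end = ord(a)+index+count
--         if end > ord('z'):
--             end = end - ord('z') + ord('a') - 1
--         answer += chr(end)
--     return answer
-- ===== SOURCE B (Python) =====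
-- def solution(s, skip, index):
--     # Precompute, once, the set of loop-counter values i whose "check" letter
--     # (i itself, or i-26 after the single wrap past 'z') lies in skip.
--     # Then each character needs only an O(|set(skip)|) interval count
--     # instead of A's O(index) inner scan.
--     cands = []
--     for c in set(skip):
--         o = ord(c)
--         if o <= 122:
--             cands.append(o)
--         if o >= 97:
--             cands.append(o + 26)
--     out = []
--     for a in s:
--         o = ord(a)
--         cnt = 0
--         for i in cands:
--             if o + 1 <= i <= o + index:
--                 cnt += 1
--         end = o + index + cnt
--         if end > 122:
--             end -= 26
--         out.append(chr(end))
--     return ''.join(out)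
-- ===== Notes on version B (the rewrite author's own statement) =====
-- stated objective: faster
-- what changed: B precomputes from set(skip), once, the list of loop-counter values whose (singly-wrapped) letter lies in skip, and replaces A's O(index) inner scan per character by an O(|set(skip)|) interval count over that list.
-- outside the precondition, e.g. on solution('a', '', 55150): A returns 'ힵ', B returns 'ힵ'; on solution('a', '', 1114030): A returns '\U0010fff5', B returns '\U0010fff5'
import Mathlib
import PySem

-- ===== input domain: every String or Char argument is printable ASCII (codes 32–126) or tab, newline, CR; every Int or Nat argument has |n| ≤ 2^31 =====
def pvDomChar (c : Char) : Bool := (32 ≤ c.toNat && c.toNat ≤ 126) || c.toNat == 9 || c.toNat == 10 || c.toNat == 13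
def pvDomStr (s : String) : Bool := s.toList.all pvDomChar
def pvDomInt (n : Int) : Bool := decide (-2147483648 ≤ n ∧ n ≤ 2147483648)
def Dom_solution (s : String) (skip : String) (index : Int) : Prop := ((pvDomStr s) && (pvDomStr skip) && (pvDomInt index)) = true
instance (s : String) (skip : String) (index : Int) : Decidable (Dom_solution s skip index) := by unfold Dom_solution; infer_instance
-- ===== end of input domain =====

-- B replaces A's O(index) inner scan per character by a precomputed list of the loop-counter
-- values whose letter lies in skip, counted per character by an interval test over that list.

-- chr(i), ported by hand: exact wherever the argument is a valid non-surrogate codepoint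
-- (which Pre_ guarantees for every returned character).
def pyChr (i : Int) : Char := Char.ofNat i.toNat

-- ===== PORT A =====
-- per-character body of A's outer loop (ord('z') = 122, ord('a') = 97;
-- 'check in skip' is char membership since check always has length 1)
def solutionChar (skip : String) (index : Int) (a : Char) : Char :=
  let o : Int := a.toNat
  let count : Int :=
    (PySem.List.pyRange (o + 1) (o + index + 1) 1).foldl
      (fun count i =>
        let check : Char := if i > 122 then pyChr (i - 122 + 97 - 1) else pyChr i
        if check ∈ skip.toList then count + 1 else count) 0
  let end1 : Int := o + index + count
  let end2 : Int := if end1 > 122 then end1 - 122 + 97 - 1 else end1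
  pyChr end2

def solution (s : String) (skip : String) (index : Int) : String :=
  String.mk (s.toList.foldl (fun answer a => answer ++ [solutionChar skip index a]) [])

-- ===== PORT B =====
-- Source B's `cands`, built once from set(skip); the counting below is order-independent
def candsOf (skip : String) : List Int :=
  (PySem.Set.ofList skip.toList).foldl
    (fun cands c =>
      let o : Int := c.toNat
      let cands := if o ≤ 122 then cands ++ [o] else cands
      if 97 ≤ o then cands ++ [o + 26] else cands) []

-- per-character body of Source B's loop
def solutionAltChar (cands : List Int) (index : Int) (a : Char) : Char :=
  let o : Int := a.toNat
  let cnt : Int :=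
    cands.foldl (fun cnt i => if o + 1 ≤ i ∧ i ≤ o + index then cnt + 1 else cnt) 0
  let end1 : Int := o + index + cnt
  let end2 : Int := if end1 > 122 then end1 - 26 else end1
  pyChr end2

def solution_alt (s : String) (skip : String) (index : Int) : String :=
  let cands := candsOf skip
  String.mk (s.toList.foldl (fun out a => out ++ [solutionAltChar cands index a]) [])

-- ===== PRECONDITION & SPEC =====
-- Pre_ excludes inputs where some chr() raises ValueError (code point negative or above
-- 0x10FFFF, so A raises), and — conservatively, by the margin 143 = A's maximum inner count —
-- the band where a returned code point would fall in the UTF-16 surrogate range 0xD800–0xDFFF,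
-- where A returns a lone-surrogate string not representable as a Lean String
-- (in the conservative margins A returns an ordinary value and B returns the same value).
def Pre_solution (s : String) (skip : String) (index : Int) : Prop :=
  (s.toList.all (fun a =>
    decide (0 ≤ (a.toNat : Int) + index) &&
      (decide ((a.toNat : Int) + index ≤ 55100) ||
        (decide (57400 ≤ (a.toNat : Int) + index) &&
          decide ((a.toNat : Int) + index ≤ 1113994))))) = true
instance (s : String) (skip : String) (index : Int) : Decidable (Pre_solution s skip index) := by
  unfold Pre_solution; infer_instance

def pvWitness_solution : String × String × Int := ("ab", "bx", 5)

def Spec_solution (s : String) (skip : String) (index : Int) (out : String) : Prop := out = solution_alt s skip index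
instance (s : String) (skip : String) (index : Int) (out : String) : Decidable (Spec_solution s skip index out) := by unfold Spec_solution; infer_instance

-- ===== CLAIM (what is proved, stated in full; the proofs are below) =====
def Claim_equal_solution : Prop := ∀ (s : String) (skip : String) (index : Int), Dom_solution s skip index → Pre_solution s skip index → Spec_solution s skip index (solution s skip index)

-- ===== LEMMAS AND PROOFS =====

-- the candidate values contributed by one distinct skip character
def fCand (c : Char) : List Int :=
  (if (c.toNat : Int) ≤ 122 then [((c.toNat : Int))] else []) ++
    (if 97 ≤ (c.toNat : Int) then [(c.toNat : Int) + 26] else [])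

theorem foldl_cands (l : List Char) (acc : List Int) :
    l.foldl (fun cands c =>
      let o : Int := c.toNat
      let cands := if o ≤ 122 then cands ++ [o] else cands
      if 97 ≤ o then cands ++ [o + 26] else cands) acc
    = acc ++ l.flatMap fCand := by
  induction l generalizing acc with
  | nil => simp
  | cons c l ih =>
    simp only [List.foldl_cons, List.flatMap_cons]
    rw [ih]
    simp only [fCand]
    split_ifs <;> simp

theorem candsOf_eq (skip : String) :
    candsOf skip = (PySem.Set.ofList skip.toList).flatMap fCand := by
  unfold candsOf
  simpa using foldl_cands (PySem.Set.ofList skip.toList) []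

theorem mem_fCand (c : Char) (x : Int) :
    x ∈ fCand c ↔ ((c.toNat : Int) ≤ 122 ∧ x = (c.toNat : Int)) ∨
      (97 ≤ (c.toNat : Int) ∧ x = (c.toNat : Int) + 26) := by
  simp only [fCand, List.mem_append]
  split_ifs <;> simp <;> omega

theorem char_eq_of_toNat_eq {c c' : Char} (h : c.toNat = c'.toNat) : c = c' := by
  have := congrArg Char.ofNat h
  rwa [Char.ofNat_toNat, Char.ofNat_toNat] at this

theorem cands_nodup (skip : String) : (candsOf skip).Nodup := by
  rw [candsOf_eq, List.nodup_flatMap]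
  refine ⟨fun c _ => ?_, ?_⟩
  · simp only [fCand]
    split_ifs <;> simp
  · refine (PySem.Set.nodup_ofList skip.toList).imp ?_
    intro c c' hne x hx hx'
    rw [mem_fCand] at hx hx'
    apply hne
    apply char_eq_of_toNat_eq
    omega

theorem toNat_pyChr (i : Int) :
    (pyChr i).toNat = if i.toNat.isValidChar then i.toNat else 0 :=
  Char.toNat_ofNat _

theorem mem_cands_iff (skip : String)
    (hskip : ∀ c ∈ skip.toList, 9 ≤ c.toNat ∧ c.toNat ≤ 126) (i : Int) (hi : 1 ≤ i) :
    ((if i > 122 then pyChr (i - 122 + 97 - 1) else pyChr i) ∈ skip.toList) ↔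
      i ∈ candsOf skip := by
  rw [candsOf_eq]
  simp only [List.mem_flatMap, PySem.Set.mem_ofList]
  constructor
  · intro hmem
    split_ifs at hmem with h122
    · refine ⟨_, hmem, ?_⟩
      obtain ⟨h9, h126⟩ := hskip _ hmem
      rw [toNat_pyChr] at h9 h126
      rw [mem_fCand, toNat_pyChr]
      split_ifs at h9 h126 ⊢ with hv
      · right
        constructor <;> [skip; push_cast] <;> omega
      · omega
    · refine ⟨_, hmem, ?_⟩
      obtain ⟨h9, h126⟩ := hskip _ hmem
      rw [toNat_pyChr] at h9 h126
      rw [mem_fCand, toNat_pyChr]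
      split_ifs at h9 h126 ⊢ with hv
      · left
        constructor <;> [skip; push_cast] <;> omega
      · omega
  · rintro ⟨c, hcin, hfc⟩
    rw [mem_fCand] at hfc
    rcases hfc with ⟨hle, rfl⟩ | ⟨h97, rfl⟩
    · rw [if_neg (by omega)]
      have : pyChr ((c.toNat : Int)) = c := by
        simp only [pyChr, Int.toNat_natCast, Char.ofNat_toNat]
      rwa [this]
    · rw [if_pos (by omega)]
      have : pyChr ((c.toNat : Int) + 26 - 122 + 97 - 1) = c := by
        have h : ((c.toNat : Int) + 26 - 122 + 97 - 1) = ((c.toNat : Int)) := by ring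
        simp only [h, pyChr, Int.toNat_natCast, Char.ofNat_toNat]
      rwa [this]

theorem countP_mem_comm (l₁ l₂ : List Int) (h₁ : l₁.Nodup) (h₂ : l₂.Nodup) :
    l₁.countP (fun x => decide (x ∈ l₂)) = l₂.countP (fun x => decide (x ∈ l₁)) := by
  rw [List.countP_eq_length_filter, List.countP_eq_length_filter]
  refine List.Perm.length_eq ?_
  refine (List.perm_ext_iff_of_nodup (h₁.filter _) (h₂.filter _)).mpr ?_
  intro x
  simp only [List.mem_filter, decide_eq_true_eq]
  tauto

theorem solutionChar_eq (skip : String) (index : Int)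
    (hskip : ∀ c ∈ skip.toList, 9 ≤ c.toNat ∧ c.toNat ≤ 126) (a : Char) :
    solutionChar skip index a = solutionAltChar (candsOf skip) index a := by
  have ho : (0 : Int) ≤ (a.toNat : Int) := Int.natCast_nonneg _
  have hcount :
      (PySem.List.pyRange ((a.toNat : Int) + 1) ((a.toNat : Int) + index + 1) 1).foldl
        (fun count i =>
          if (if i > 122 then pyChr (i - 122 + 97 - 1) else pyChr i) ∈ skip.toList
          then count + 1 else count) (0 : Int)
      = (candsOf skip).foldl
          (fun cnt i =>
            if (a.toNat : Int) + 1 ≤ i ∧ i ≤ (a.toNat : Int) + index then cnt + 1 else cnt)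
          (0 : Int) := by
    rw [PySem.List.foldl_ite_add_one, PySem.List.foldl_ite_add_one]
    congr 1
    rw [List.countP_congr (q := fun i => decide (i ∈ candsOf skip))
        (fun i hi => by
          have hm := PySem.List.mem_pyRange_one.mp hi
          simp only [decide_eq_true_eq]
          exact mem_cands_iff skip hskip i (by omega))]
    rw [countP_mem_comm _ _ (PySem.List.nodup_pyRange_one _ _) (cands_nodup skip)]
    have h2 : List.countP
        (fun x => decide (x ∈ PySem.List.pyRange ((a.toNat : Int) + 1) ((a.toNat : Int) + index + 1) 1))
        (candsOf skip)
      = List.countP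
        (fun x => decide ((a.toNat : Int) + 1 ≤ x ∧ x ≤ (a.toNat : Int) + index))
        (candsOf skip) := by
      refine List.countP_congr ?_
      intro i _
      simp only [decide_eq_true_eq, PySem.List.mem_pyRange_one]
      omega
    rw [h2]
  show pyChr (if (a.toNat : Int) + index + _ > 122 then _ else _) =
    pyChr (if (a.toNat : Int) + index + _ > 122 then _ else _)
  rw [hcount]
  congr 1
  split_ifs <;> ring
theorem solution_spec : Claim_equal_solution := by
  intro s skip index hdom _
  unfold Spec_solution
  have hskip : ∀ c ∈ skip.toList, 9 ≤ c.toNat ∧ c.toNat ≤ 126 := by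
    simp only [Dom_solution, Bool.and_eq_true, pvDomStr, List.all_eq_true, pvDomChar] at hdom
    intro c hc
    have := hdom.1.2 c hc
    simp only [Bool.or_eq_true, Bool.and_eq_true, decide_eq_true_eq, beq_iff_eq] at this
    omega
  show String.mk _ = String.mk _
  rw [PySem.List.foldl_append_singleton_eq_map, PySem.List.foldl_append_singleton_eq_map]
  congr 1
  exact List.map_congr_left (fun a _ => solutionChar_eq skip index hskip a)
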